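-- pv_equiv track=rewrite | github.com/Jimeneznet/ICCI | desafio4.py | BloqueMasPacientes
-- ===== SOURCE A (Python) =====
-- def BloqueMasPacientes(listaBloques):
--
--     cantidadMasPacientes = max(listaBloques)
--     bloquesConIndice = []
--
--     for i, bloque in enumerate(listaBloques):
--         #Chequea recursivamente por los bloques
--         #agrega a los bloques con respectivo indice de horario
--         #Solo si es que son los que tienen más pacientes
--         #Es decir, si hay mas de un bloque con mayor cantidad de pacientes, es agregado a la lista.
--         if(bloque == cantidadMasPacientes):
--             bloqueAgregar = [i,bloque]
--             bloquesConIndice.append(bloqueAgregar)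
--
--     return bloquesConIndice
-- ===== SOURCE B (Python) =====
-- def BloqueMasPacientes(listaBloques):
--     if not listaBloques:
--         raise ValueError("max() arg is an empty sequence")
--     best = None
--     bloquesConIndice = []
--     for i, bloque in enumerate(listaBloques):
--         if best is None or bloque > best:
--             best = bloque
--             bloquesConIndice = [[i, bloque]]
--         elif bloque == best:
--             bloquesConIndice.append([i, bloque])
--     return bloquesConIndice
-- ===== Notes on version B (the rewrite author's own statement) =====
-- stated objective: alternative
-- what changed: Single pass over enumerate that maintains the running maximum and the list of [index,value] pairs achieving it (reset on strictly greater, append on equal), instead of max() followed by a second filtering scan.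
import Mathlib
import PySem

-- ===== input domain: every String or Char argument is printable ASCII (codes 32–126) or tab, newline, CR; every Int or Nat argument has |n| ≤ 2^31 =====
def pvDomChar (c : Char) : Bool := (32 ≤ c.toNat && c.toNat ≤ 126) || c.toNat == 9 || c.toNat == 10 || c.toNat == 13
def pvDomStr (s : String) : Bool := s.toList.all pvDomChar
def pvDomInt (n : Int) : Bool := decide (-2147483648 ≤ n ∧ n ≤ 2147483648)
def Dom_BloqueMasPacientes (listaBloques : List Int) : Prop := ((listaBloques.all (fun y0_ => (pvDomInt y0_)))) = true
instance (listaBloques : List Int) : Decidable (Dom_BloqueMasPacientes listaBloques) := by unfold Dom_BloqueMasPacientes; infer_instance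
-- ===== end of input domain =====

-- B fuses A's max() pass and filtering pass into one scan keeping the running best and its [index,value] pairs (objective: alternative single-pass decomposition).

-- ===== PORT A =====
def BloqueMasPacientes (listaBloques : List Int) : List (List Int) :=
  match PySem.List.max? listaBloques (fun y => y) with
  | none => []   -- unreachable under Pre_: Python's max([]) raises ValueError
  | some cantidadMasPacientes =>
      (PySem.List.enumerate listaBloques).foldl
        (fun bloquesConIndice p =>
          if p.2 == cantidadMasPacientes then bloquesConIndice ++ [[p.1, p.2]]
          else bloquesConIndice) []

-- ===== PORT B =====
def bStep (st : Option Int × List (List Int)) (p : Int × Int) : Option Int × List (List Int) :=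
  match st.1 with
  | none => (some p.2, [[p.1, p.2]])
  | some best =>
      if p.2 > best then (some p.2, [[p.1, p.2]])
      else if p.2 == best then (some best, st.2 ++ [[p.1, p.2]])
      else st

def BloqueMasPacientes_alt (listaBloques : List Int) : List (List Int) :=
  match listaBloques with
  | [] => []   -- unreachable under Pre_: Source B raises ValueError on the empty list
  | _ => ((PySem.List.enumerate listaBloques).foldl bStep (none, [])).2

-- ===== PRECONDITION & SPEC =====
-- Pre_ excludes only the empty list, on which both A (max([])) and B raise ValueError.
def Pre_BloqueMasPacientes (listaBloques : List Int) : Prop := listaBloques ≠ []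
instance (listaBloques : List Int) : Decidable (Pre_BloqueMasPacientes listaBloques) := by unfold Pre_BloqueMasPacientes; infer_instance
def pvWitness_BloqueMasPacientes : List Int := [3, 1, 3]

def Spec_BloqueMasPacientes (listaBloques : List Int) (out : List (List Int)) : Prop := out = BloqueMasPacientes_alt listaBloques
instance (listaBloques : List Int) (out : List (List Int)) : Decidable (Spec_BloqueMasPacientes listaBloques out) := by unfold Spec_BloqueMasPacientes; infer_instance

-- ===== CLAIM (what is proved, stated in full; the proofs are below) =====
def Claim_equal_BloqueMasPacientes : Prop := ∀ (listaBloques : List Int), Dom_BloqueMasPacientes listaBloques → Pre_BloqueMasPacientes listaBloques → Spec_BloqueMasPacientes listaBloques (BloqueMasPacientes listaBloques)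

-- ===== LEMMAS AND PROOFS =====

-- Invariant of B's single pass from a some-state: the best becomes the running max and the
-- collected pairs become exactly A's filter of the remaining enumeration (the old accumulator
-- survives iff no strictly larger element appears).
theorem bStep_go (xs : List Int) : ∀ (k b : Int) (acc : List (List Int)),
    (PySem.List.enumerate xs k).foldl bStep (some b, acc) =
    (some (xs.foldl max b),
     (if xs.foldl max b = b then acc else []) ++
       ((PySem.List.enumerate xs k).filter (fun p => p.2 == xs.foldl max b)).map
         (fun p => [p.1, p.2])) := by
  induction xs with
  | nil => intro k b acc; simp [PySem.List.enumerate_nil]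
  | cons x t ih =>
    intro k b acc
    simp only [PySem.List.enumerate_cons, List.foldl_cons, List.filter_cons]
    rcases lt_trichotomy b x with h | h | h
    · have hle : x ≤ t.foldl max x := (PySem.List.le_foldl_max t x).1
      have hbx : max b x = x := max_eq_right h.le
      simp only [hbx]
      have hMb : t.foldl max x ≠ b := by omega
      have hstep : bStep (some b, acc) (k, x) = (some x, [[k, x]]) := by
        simp only [bStep, gt_iff_lt]
        rw [if_pos h]
      rw [hstep, ih (k+1) x [[k, x]]]
      by_cases hx : t.foldl max x = x
      · simp [hx, show x ≠ b by omega]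
      · have hne : ¬ (x == t.foldl max x) = true := by simpa using fun h' => hx h'.symm
        simp [hMb, hx, hne]
    · simp only [← h, max_self]
      have hstep : bStep (some b, acc) (k, b) = (some b, acc ++ [[k, b]]) := by
        simp [bStep]
      rw [hstep, ih (k+1) b (acc ++ [[k, b]])]
      by_cases hx : t.foldl max b = b
      · simp [hx]
      · have hne : ¬ (b == t.foldl max b) = true := by simpa using fun h' => hx h'.symm
        simp [hx, hne]
    · have hbx : max b x = b := max_eq_left h.le
      simp only [hbx]
      have hbM : b ≤ t.foldl max b := (PySem.List.le_foldl_max t b).1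
      have hxM : x ≠ t.foldl max b := by omega
      have hstep : bStep (some b, acc) (k, x) = (some b, acc) := by
        simp only [bStep, gt_iff_lt]
        rw [if_neg (by omega), if_neg (by simpa using by omega)]
      rw [hstep, ih (k+1) b acc]
      have hne : ¬ (x == t.foldl max b) = true := by simpa using hxM
      simp [hne]

theorem hfirst_aux (h : Int) : bStep (none, []) ((0 : Int), h) = (some h, [[0, h]]) := by
  simp [bStep]

-- ===== VERDICT (by name: the statement is the Claim_ definition above) =====
theorem BloqueMasPacientes_spec : Claim_equal_BloqueMasPacientes := by
  intro xs _ hpre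
  match xs with
  | [] => exact absurd rfl hpre
  | h :: t =>
    show BloqueMasPacientes (h :: t) = BloqueMasPacientes_alt (h :: t)
    unfold BloqueMasPacientes BloqueMasPacientes_alt
    rw [PySem.List.max?_id_cons]
    dsimp only
    have henum : PySem.List.enumerate (h :: t) (0 : Int) = (0, h) :: PySem.List.enumerate t 1 := by
      rw [PySem.List.enumerate_cons]; norm_num
    rw [henum]
    rw [PySem.List.foldl_append_if]
    rw [List.foldl_cons, hfirst_aux h, bStep_go t 1 h [[0, h]]]
    rw [List.filter_cons]
    have hle : h ≤ t.foldl max h := (PySem.List.le_foldl_max t h).1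
    by_cases hx : t.foldl max h = h
    · simp [hx]
    · have hne : ¬ (h == t.foldl max h) = true := by simpa using fun h' => hx h'.symm
      simp [hx, hne]
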